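-- pv_equiv track=rewrite | github.com/hyeongbin96/algorithm-in-action | 프로그래머스/0/181862. 세 개의 구분자/세 개의 구분자.py | solution
-- ===== SOURCE A (Python) =====
-- def solution(myStr):
--     answer = []
--     words = ""
--
--     for i in range(len(myStr)):
--         if myStr[i] != "a" and myStr[i] != "b" and myStr[i] != "c":
--             words += myStr[i]
--         else:
--             answer.append(words)
--             words = ""
--     answer.append(words)
--
--     if len([i for i in answer if i != ""]) == 0:
--         return ["EMPTY"]
--     else:
--         return [i for i in answer if i != ""]
-- ===== SOURCE B (Python) =====
-- def solution(myStr):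
--     # normalise all three separators to 'a', split once, keep non-empty segments
--     segs = myStr.replace("b", "a").replace("c", "a").split("a")
--     return [s for s in segs if s] or ["EMPTY"]
-- ===== Notes on version B (the rewrite author's own statement) =====
-- stated objective: faster
-- what changed: Replaces the explicit per-character index loop with accumulator string and manual resets by normalising the two other separator characters to the first one with str.replace, splitting once with str.split, and keeping non-empty segments via a comprehension with a fallback list for the all-empty case.
import Mathlib
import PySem

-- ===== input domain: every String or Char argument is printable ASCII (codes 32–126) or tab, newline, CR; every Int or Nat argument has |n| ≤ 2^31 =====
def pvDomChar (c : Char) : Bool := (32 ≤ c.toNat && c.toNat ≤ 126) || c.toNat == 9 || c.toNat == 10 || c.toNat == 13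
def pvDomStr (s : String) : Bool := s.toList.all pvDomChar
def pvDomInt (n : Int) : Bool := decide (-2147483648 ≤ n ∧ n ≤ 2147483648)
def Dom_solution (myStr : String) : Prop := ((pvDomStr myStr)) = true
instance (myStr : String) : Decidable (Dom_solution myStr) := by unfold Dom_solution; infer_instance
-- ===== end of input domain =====

set_option maxHeartbeats 800000


-- B replaces the per-character scan by replace+split library passes and a filter with a fallback (measured faster by a constant factor).

-- ===== PORT A =====
-- char-by-char scan with an accumulator string, flushed at each separator
def solution (myStr : String) : List String :=
  let st := myStr.toList.foldl
    (fun (p : List String × String) c =>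
      if c ≠ 'a' ∧ c ≠ 'b' ∧ c ≠ 'c' then (p.1, p.2.push c)
      else (p.1 ++ [p.2], ""))
    ([], "")
  let answer := st.1 ++ [st.2]
  if (answer.filter (fun i => i != "")).length = 0 then ["EMPTY"]
  else answer.filter (fun i => i != "")

-- ===== PORT B =====
-- .replace("b","a").replace("c","a").split("a"); sep "a" ≠ "" so split? is always some
def solution_alt (myStr : String) : List String :=
  let segs := (PySem.Str.split? (PySem.Str.replace (PySem.Str.replace myStr "b" "a") "c" "a") "a").getD []
  let kept := segs.filter (fun s => s != "")
  match kept with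
  | [] => ["EMPTY"]
  | _ => kept

-- ===== PRECONDITION & SPEC =====
def Spec_solution (myStr : String) (out : List String) : Prop := out = solution_alt myStr
instance (myStr : String) (out : List String) : Decidable (Spec_solution myStr out) := by unfold Spec_solution; infer_instance

-- ===== CLAIM (what is proved, stated in full; the proofs are below) =====
def Claim_equal_solution : Prop := ∀ (myStr : String), Dom_solution myStr → Spec_solution myStr (solution myStr)

-- ===== LEMMAS AND PROOFS =====

/-- Split a char list at every char satisfying `p` (always returns ≥ 1 piece). -/
def splitP (p : Char → Bool) : List Char → List (List Char)
  | [] => [[]]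
  | c :: t => if p c then [] :: splitP p t else (splitP p t).modifyHead (c :: ·)

theorem splitP_ne_nil (p : Char → Bool) (l : List Char) : splitP p l ≠ [] := by
  induction l with
  | nil => simp [splitP]
  | cons c t ih =>
    simp only [splitP]
    split
    · simp
    · cases h : splitP p t with
      | nil => exact absurd h ih
      | cons x y => simp [List.modifyHead]

theorem str_eq_of_toList {s t : String} (h : s.toList = t.toList) : s = t := by
  have := congrArg String.ofList h
  simpa using this

theorem replace_go_single (b a : Char) :
    ∀ (l acc : List Char) (fuel : Nat), l.length ≤ fuel →
      PySem.Chars.replace.go [b] [a] fuel l acc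
        = acc.reverse ++ l.map (fun c => if c = b then a else c) := by
  intro l
  induction l with
  | nil =>
    intro acc fuel _
    cases fuel <;> simp [PySem.Chars.replace.go]
  | cons c t ih =>
    intro acc fuel hf
    cases fuel with
    | zero => simp at hf
    | succ n =>
      have ht : t.length ≤ n := by simpa using hf
      by_cases hc : b = c
      · subst hc
        simp [PySem.Chars.replace.go, List.isPrefixOf, ih _ _ ht]
      · simp [PySem.Chars.replace.go, List.isPrefixOf, hc, Ne.symm hc, ih _ _ ht]

theorem chars_replace_single (b a : Char) (l : List Char) :
    PySem.Chars.replace l [b] [a] = l.map (fun c => if c = b then a else c) := by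
  simp [PySem.Chars.replace, replace_go_single b a l [] l.length le_rfl]

theorem splitOn_go_single (a : Char) :
    ∀ (l cur : List Char) (acc : List (List Char)) (fuel : Nat), l.length < fuel →
      PySem.Chars.splitOn.go [a] fuel l cur acc
        = acc.reverse ++ (splitP (· == a) l).modifyHead (cur.reverse ++ ·) := by
  intro l
  induction l with
  | nil =>
    intro cur acc fuel hf
    cases fuel with
    | zero => simp at hf
    | succ n => simp [PySem.Chars.splitOn.go, splitP, List.modifyHead]
  | cons c t ih =>
    intro cur acc fuel hf
    cases fuel with
    | zero => simp at hf
    | succ n =>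
      have ht : t.length < n := by simpa [Nat.succ_lt_succ_iff] using hf
      obtain ⟨h0, t0, hsp⟩ : ∃ h0 t0, splitP (· == a) t = h0 :: t0 := by
        cases hspt : splitP (· == a) t with
        | nil => exact absurd hspt (splitP_ne_nil _ t)
        | cons x y => exact ⟨x, y, rfl⟩
      by_cases hc : c = a
      · subst hc
        simp [PySem.Chars.splitOn.go, List.isPrefixOf, ih _ _ _ ht, splitP, hsp, List.modifyHead]
      · have h2 : ¬ (a = c) := fun h => hc h.symm
        simp [PySem.Chars.splitOn.go, List.isPrefixOf, h2, ih _ _ _ ht, splitP, hc, hsp,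
          List.modifyHead]

theorem chars_splitOn_single (a : Char) (l : List Char) :
    PySem.Chars.splitOn l [a] = splitP (· == a) l := by
  have h := splitOn_go_single a l [] [] (l.length + 1) (Nat.lt_succ_self _)
  obtain ⟨h0, t0, hsp⟩ : ∃ h0 t0, splitP (· == a) l = h0 :: t0 := by
    cases hspt : splitP (· == a) l with
    | nil => exact absurd hspt (splitP_ne_nil _ l)
    | cons x y => exact ⟨x, y, rfl⟩
  simpa [PySem.Chars.splitOn, hsp, List.modifyHead] using h

theorem splitP_map (p q : Char → Bool) (f : Char → Char)
    (h1 : ∀ c, p (f c) = q c) (h2 : ∀ c, q c = false → f c = c) (l : List Char) :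
    splitP p (l.map f) = splitP q l := by
  induction l with
  | nil => rfl
  | cons c t ih =>
    cases hq : q c with
    | true => simp [splitP, h1 c, hq, ih]
    | false =>
      have hfc := h2 c hq
      have hp : p c = false := by rw [← hfc, h1 c]; exact hq
      simp [splitP, hfc, hp, hq, ih]

/-- the separator predicate of the task -/
def sepQ (c : Char) : Bool := c == 'a' || c == 'b' || c == 'c'

theorem modifyHead_empty_append (l : List String) :
    l.modifyHead (fun s => "" ++ s) = l := by
  cases l <;> simp [List.modifyHead]

theorem foldA (l : List Char) (acc : List String) (cur : String) :
    (l.foldl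
      (fun (p : List String × String) c =>
        if c ≠ 'a' ∧ c ≠ 'b' ∧ c ≠ 'c' then (p.1, p.2.push c)
        else (p.1 ++ [p.2], ""))
      (acc, cur)).1 ++
    [(l.foldl
      (fun (p : List String × String) c =>
        if c ≠ 'a' ∧ c ≠ 'b' ∧ c ≠ 'c' then (p.1, p.2.push c)
        else (p.1 ++ [p.2], ""))
      (acc, cur)).2] =
    acc ++ ((splitP sepQ l).map String.ofList).modifyHead (cur ++ ·) := by
  induction l generalizing acc cur with
  | nil =>
    simp [splitP, List.modifyHead]
  | cons c t ih =>
    by_cases hs : sepQ c = true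
    · have hcond : ¬ (c ≠ 'a' ∧ c ≠ 'b' ∧ c ≠ 'c') := by
        simp [sepQ] at hs
        rcases hs with (h | h) | h <;> simp [h]
      simp only [List.foldl_cons, if_neg hcond]
      rw [ih]
      simp only [splitP, hs, if_true, List.map_cons, List.modifyHead]
      cases hsp : splitP sepQ t with
      | nil => exact absurd hsp (splitP_ne_nil _ t)
      | cons x y => simp
    · have hq : sepQ c = false := by simpa using hs
      have hcond : (c ≠ 'a' ∧ c ≠ 'b' ∧ c ≠ 'c') := by
        simp [sepQ] at hq
        exact ⟨hq.1.1, hq.1.2, hq.2⟩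
      obtain ⟨h0, t0, hsp⟩ : ∃ h0 t0, splitP sepQ t = h0 :: t0 := by
        cases hspt : splitP sepQ t with
        | nil => exact absurd hspt (splitP_ne_nil _ t)
        | cons x y => exact ⟨x, y, rfl⟩
      simp only [List.foldl_cons, if_pos hcond]
      rw [ih]
      have hstep : splitP sepQ (c :: t) = (splitP sepQ t).modifyHead (c :: ·) := by
        simp [splitP, hq]
      rw [hstep, hsp]
      simp only [List.modifyHead, List.map_cons]
      congr 2
      apply str_eq_of_toList
      simp

theorem segs_eq (myStr : String) :
    (PySem.Str.split? (PySem.Str.replace (PySem.Str.replace myStr "b" "a") "c" "a") "a").getD []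
      = (splitP sepQ myStr.toList).map String.ofList := by
  have htb : ("b" : String).toList = ['b'] := by decide
  have htc : ("c" : String).toList = ['c'] := by decide
  have hta : ("a" : String).toList = ['a'] := by decide
  set s2 := PySem.Str.replace (PySem.Str.replace myStr "b" "a") "c" "a" with hs2
  have hts : s2.toList
      = (myStr.toList.map (fun c => if c = 'b' then 'a' else c)).map
          (fun c => if c = 'c' then 'a' else c) := by
    rw [hs2, PySem.Str.toList_replace, PySem.Str.toList_replace, htb, htc, hta,
      chars_replace_single, chars_replace_single]
  have e1 : ∀ c : Char, ((if c = 'c' then 'a' else c) == 'a') = (c == 'a' || c == 'c') := by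
    intro c
    by_cases h : c = 'c'
    · subst h; decide
    · have hb : (c == 'c') = false := by simp [h]
      rw [if_neg h, hb, Bool.or_false]
  have e2 : ∀ c : Char, (c == 'a' || c == 'c') = false → (if c = 'c' then 'a' else c) = c := by
    intro c hc
    simp at hc
    rw [if_neg hc.2]
  have e3 : ∀ c : Char,
      ((if c = 'b' then 'a' else c) == 'a' || (if c = 'b' then 'a' else c) == 'c') = sepQ c := by
    intro c
    by_cases h : c = 'b'
    · subst h; decide
    · have hb : (c == 'b') = false := by simp [h]
      unfold sepQ
      rw [if_neg h, hb, Bool.or_false]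
  have e4 : ∀ c : Char, sepQ c = false → (if c = 'b' then 'a' else c) = c := by
    intro c hc
    simp [sepQ] at hc
    rw [if_neg hc.1.2]
  have hsp : splitP (· == 'a') s2.toList = splitP sepQ myStr.toList := by
    rw [hts]
    rw [splitP_map _ _ _ e1 e2, splitP_map _ _ _ e3 e4]
  have hchars : PySem.Chars.split? s2.toList ['a'] = some (splitP sepQ myStr.toList) := by
    unfold PySem.Chars.split?
    rw [if_neg (by decide), chars_splitOn_single, hsp]
  have hmap := PySem.Str.split?_map s2 "a"
  rw [hta, hchars] at hmap
  cases hX : PySem.Str.split? s2 "a" with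
  | none => rw [hX] at hmap; simp at hmap
  | some L =>
    rw [hX] at hmap
    simp only [Option.map_some, Option.some.injEq] at hmap
    have : L = (L.map String.toList).map String.ofList := by
      simp [List.map_map, Function.comp_def]
    rw [Option.getD_some, this, hmap]

-- ===== VERDICT (by name: the statement is the Claim_ definition above) =====
theorem solution_spec : Claim_equal_solution := by
  intro myStr _
  unfold Spec_solution solution solution_alt
  rw [segs_eq myStr]
  have hA := foldA myStr.toList [] ""
  rw [List.nil_append, modifyHead_empty_append] at hA
  dsimp only
  rw [hA]
  cases hk : ((splitP sepQ myStr.toList).map String.ofList).filter (fun s => s != "") with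
  | nil => simp
  | cons x y => simp
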